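-- pv_equiv track=rewrite | github.com/KuJunhui/code-test | kakao/2025kakao/1차/Lv2리프노드수최대화/내풀이.py | solution
-- ===== SOURCE A (Python) =====
-- def solution(dist_limit, split_limit):
--     D = dist_limit
--     S = split_limit
--
--     pow2 = [1]
--     while pow2[-1] <= S:
--         pow2.append(pow2[-1] * 2)
--
--     pow3 = [1]
--     while pow3[-1] <= S:
--         pow3.append(pow3[-1] * 3)
--
--     def need_two(a, m):
--         # 2-분기 깊이 a개를 거쳐
--         # 3-분기를 달 수 있는 자리 m개를 만들기 위한 최소 분배 노드 수
--         total = 0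
--         x = 2
--         for _ in range(a):
--             total += (m + x - 1) // x   # ceil(m / x)
--             x *= 2
--         return total
--
--     answer = 1
--
--     for a in range(len(pow2)):
--         if pow2[a] > S:
--             break
--
--         # 3-분기 없이 2-분기만 쓰는 경우
--         answer = max(answer, 1 + min(D, pow2[a] - 1))
--
--         for b in range(1, len(pow3)):
--             if pow2[a] * pow3[b] > S:
--                 break
--
--             cap3 = (pow3[b] - 1) // 2  # 자리 1개당 3-분기에서 쓸 수 있는 최대 분배 노드 수
--             full_need = (pow2[a] - 1) + pow2[a] * cap3  # 완전하게 만들 때 필요한 분배 노드 수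
--
--             # 완전하게 만들 수 있으면 정답은 리프 개수 그대로
--             if full_need <= D:
--                 answer = max(answer, pow2[a] * pow3[b])
--                 continue
--
--             # dist_limit 안에서 만들 수 있는 최대 리프 수 계산
--             lo, hi = 1, pow2[a]
--             best = pow2[a]
--
--             while lo <= hi:
--                 mid = (lo + hi) // 2
--                 if need_two(a, mid) + mid * cap3 >= D:
--                     best = mid
--                     hi = mid - 1
--                 else:
--                     lo = mid + 1
--
--             prefix = need_two(a, best)
--
--             # prefix만큼 2-분기에 쓰고, 남은 건 전부 3-분기에 쓰는 게 최선
--             answer = max(answer, 1 + 2 * D - prefix)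
--
--     return answer
-- ===== SOURCE B (Python) =====
-- def solution(dist_limit, split_limit):
--     D, S = dist_limit, split_limit
--     best_ans = 1
--     a, p2 = 0, 1
--     while p2 <= S:
--         best_ans = max(best_ans, 1 + min(D, p2 - 1))
--         cap, p3 = 1, 3
--         while p2 * p3 <= S:
--             if (p2 - 1) + p2 * cap <= D:
--                 best_ans = max(best_ans, p2 * p3)
--             else:
--                 m = _first_reach(a, cap, D, p2)
--                 best_ans = max(best_ans, 1 + 2 * D - _cost(a, m))
--             cap, p3 = 3 * cap + 1, 3 * p3
--         a, p2 = a + 1, 2 * p2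
--     return best_ans
--
--
-- def _cost(a, m):
--     # closed form of the branching cost: sum_{i=1..a} ceil(m/2^i) = a + (m-1) - popcount(m-1)
--     # (valid for 1 <= m <= 2^a)
--     return a + (m - 1) - bin(m - 1).count("1")
--
--
-- def _first_reach(a, c, D, N):
--     # least m in [1, N] with _cost(a, m) + m*c >= D, else N: since
--     # _cost(a, m) + m*c <= a - 1 + m*(c+1), every m with m*(c+1) <= D - a fails,
--     # so start at that arithmetic lower bound and walk forward (at most ~a steps).
--     m = min(N, max(1, (D - a) // (c + 1) + 1))
--     while m < N and _cost(a, m) + m * c < D: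
--         m += 1
--     return m
-- ===== Notes on version B (the rewrite author's own statement) =====
-- stated objective: alternative
-- what changed: B eliminates A's per-candidate binary search and the O(a)-term need_two loop: it uses the popcount closed form need_two(a,m) = a + (m-1) - popcount(m-1) and finds the least satisfying m by inverting the linear part arithmetically (start at (D-a)//(cap3+1)+1) plus a short forward walk, with powers and cap3 maintained incrementally instead of precomputed lists.
import Mathlib
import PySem

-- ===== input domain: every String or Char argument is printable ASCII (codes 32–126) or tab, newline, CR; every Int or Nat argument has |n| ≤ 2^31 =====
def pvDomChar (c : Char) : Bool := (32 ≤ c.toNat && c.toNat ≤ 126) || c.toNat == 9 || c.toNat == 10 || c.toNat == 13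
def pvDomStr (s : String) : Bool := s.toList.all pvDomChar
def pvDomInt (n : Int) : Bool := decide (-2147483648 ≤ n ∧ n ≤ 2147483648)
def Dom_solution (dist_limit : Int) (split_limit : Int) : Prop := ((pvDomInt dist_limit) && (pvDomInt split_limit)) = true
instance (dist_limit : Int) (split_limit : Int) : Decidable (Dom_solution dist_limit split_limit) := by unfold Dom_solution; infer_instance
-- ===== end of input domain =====

-- B replaces A's need_two loop by its popcount closed form and A's binary search by an
-- arithmetic lower bound plus a short forward walk (objective: alternative).
-- While-loops are ported as structural recursion on a fuel that bounds the iteration count;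
-- every loop guard is re-checked inside, so each port computes exactly its Python's value.

-- ===== PORT A =====
-- pow2 / pow3 construction: while pow[-1] <= S: pow.append(pow[-1] * k)
-- (fuel (S+1).toNat bounds the number of doublings/triplings; the guard 'last ≤ S' is the loop test)
def buildPow2 (S : Int) : Nat → Int → List Int
  | 0, last => [last]
  | (n + 1), last => if last ≤ S then last :: buildPow2 S n (last * 2) else [last]

def buildPow3 (S : Int) : Nat → Int → List Int
  | 0, last => [last]
  | (n + 1), last => if last ≤ S then last :: buildPow3 S n (last * 3) else [last]

-- need_two(a, m): total += (m + x - 1) // x; x *= 2, a times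
def needTwoGo : Nat → Int → Int → Int → Int
  | 0, _, _, total => total
  | Nat.succ a, m, x, total => needTwoGo a m (x * 2) (total + PySem.Int.floordiv (m + x - 1) x)

def needTwoA (a : Nat) (m : Int) : Int := needTwoGo a m 2 0

-- the while lo <= hi binary search (fuel (hi+1-lo).toNat bounds the iterations; the guard is the loop test)
def bsearch (a : Nat) (cap3 D : Int) : Nat → Int → Int → Int → Int
  | 0, _, _, best => best
  | (n + 1), lo, hi, best =>
    if lo ≤ hi then
      let mid := PySem.Int.floordiv (lo + hi) 2
      if needTwoA a mid + mid * cap3 ≥ D then bsearch a cap3 D n lo (mid - 1) mid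
      else bsearch a cap3 D n (mid + 1) hi best
    else best

-- for b in range(1, len(pow3)) with break/continue: structural recursion over the tail of pow3
def loopB (D S p2 : Int) (a : Nat) : List Int → Int → Int
  | [], answer => answer
  | v :: rest, answer =>
    if p2 * v > S then answer
    else
      let cap3 := PySem.Int.floordiv (v - 1) 2
      let fullNeed := (p2 - 1) + p2 * cap3
      let answer' :=
        if fullNeed ≤ D then max answer (p2 * v)
        else
          let best := bsearch a cap3 D p2.toNat 1 p2 p2
          let pref := needTwoA a best
          max answer (1 + 2 * D - pref)
      loopB D S p2 a rest answer'

-- for a in range(len(pow2)) with break: structural recursion over pow2, a = current index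
def loopA (D S : Int) (pow3 : List Int) : List Int → Nat → Int → Int
  | [], _, answer => answer
  | p :: rest, a, answer =>
    if p > S then answer
    else
      let answer1 := max answer (1 + min D (p - 1))
      let answer2 := loopB D S p a (pow3.drop 1) answer1
      loopA D S pow3 rest (a + 1) answer2

def solution (dist_limit : Int) (split_limit : Int) : Int :=
  loopA dist_limit split_limit (buildPow3 split_limit (split_limit + 1).toNat 1)
    (buildPow2 split_limit (split_limit + 1).toNat 1) 0 1

-- ===== PORT B =====
-- popcount: bin(n).count("1") for n ≥ 0
def pc : Nat → Nat
  | 0 => 0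
  | (n + 1) => pc ((n + 1) / 2) + (n + 1) % 2
decreasing_by exact Nat.div_lt_self (Nat.succ_pos n) (by omega)

-- _cost(a, m) = a + (m - 1) - bin(m - 1).count("1")   (B only calls it with m ≥ 1)
def costB (a : Nat) (m : Int) : Int := (a : Int) + (m - 1) - (pc (m - 1).toNat : Int)

-- while m < N and _cost(a, m) + m * c < D: m += 1
-- (the fuel is exactly (N - m).toNat at the call, so fuel 0 IS the failing 'm < N' guard)
def scanUp (a : Nat) (c D : Int) : Nat → Int → Int
  | 0, m => m
  | (n + 1), m => if costB a m + m * c < D then scanUp a c D n (m + 1) else m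

-- m = min(N, max(1, (D - a) // (c + 1) + 1)); walk forward
def firstReach (a : Nat) (c D N : Int) : Int :=
  let s := min N (max 1 (PySem.Int.floordiv (D - (a : Int)) (c + 1) + 1))
  scanUp a c D (N - s).toNat s

-- inner while p2 * p3 <= S (fuel (S+1).toNat bounds the triplings; the guard is the loop test)
def altLoopB (D S p2 : Int) (a : Nat) : Nat → Int → Int → Int → Int
  | 0, _, _, answer => answer
  | (n + 1), cap, p3, answer =>
    if p2 * p3 ≤ S then
      let answer' :=
        if (p2 - 1) + p2 * cap ≤ D then max answer (p2 * p3)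
        else max answer (1 + 2 * D - costB a (firstReach a cap D p2))
      altLoopB D S p2 a n (3 * cap + 1) (3 * p3) answer'
    else answer

-- outer while p2 <= S (fuel (S+1).toNat bounds the doublings; the guard is the loop test)
def altLoopA (D S : Int) : Nat → Int → Nat → Int → Int
  | 0, _, _, answer => answer
  | (n + 1), p2, a, answer =>
    if p2 ≤ S then
      let answer1 := max answer (1 + min D (p2 - 1))
      let answer2 := altLoopB D S p2 a (S + 1).toNat 1 3 answer1
      altLoopA D S n (2 * p2) (a + 1) answer2
    else answer

def solution_alt (dist_limit : Int) (split_limit : Int) : Int :=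
  altLoopA dist_limit split_limit (split_limit + 1).toNat 1 0 1

-- ===== PRECONDITION & SPEC =====
def Spec_solution (dist_limit : Int) (split_limit : Int) (out : Int) : Prop := out = solution_alt dist_limit split_limit
instance (dist_limit : Int) (split_limit : Int) (out : Int) : Decidable (Spec_solution dist_limit split_limit out) := by unfold Spec_solution; infer_instance

-- ===== CLAIM (what is proved, stated in full; the proofs are below) =====
def Claim_equal_solution : Prop := ∀ (dist_limit : Int) (split_limit : Int), Dom_solution dist_limit split_limit → Spec_solution dist_limit split_limit (solution dist_limit split_limit)

-- ===== LEMMAS AND PROOFS =====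

-- ceil(m / 2x) = ceil(ceil(m/2) / x), in floordiv form
lemma ceil_half_compose (m x : Int) (hx : 1 ≤ x) :
    PySem.Int.floordiv (m + 2 * x - 1) (2 * x)
      = PySem.Int.floordiv (PySem.Int.floordiv (m + 1) 2 + x - 1) x := by
  rw [PySem.Int.floordiv_eq_ediv_of_pos (by omega : (0:Int) < 2 * x),
      PySem.Int.floordiv_eq_ediv_of_pos (by omega : (0:Int) < 2),
      PySem.Int.floordiv_eq_ediv_of_pos (by omega : (0:Int) < x)]
  set t := (m + 1) / 2 with ht
  have hm : 2 * t + (m + 1) % 2 = m + 1 := Int.mul_ediv_add_emod (m + 1) 2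
  set e := (t + x - 1) / x with he
  have h1 : x * e + (t + x - 1) % x = t + x - 1 := Int.mul_ediv_add_emod _ _
  have hr : 0 ≤ (t + x - 1) % x := Int.emod_nonneg _ (by omega)
  have hr2 : (t + x - 1) % x < x := Int.emod_lt_of_pos _ (by omega)
  have h2x : e * (2 * x) = 2 * (x * e) := by ring
  have key : m + 2 * x - 1 = (2 * ((t + x - 1) % x) + (m + 1) % 2) + e * (2 * x) := by omega
  rw [key, Int.add_mul_ediv_right _ _ (by omega : (2 * x) ≠ 0),
      Int.ediv_eq_zero_of_lt (by omega) (by omega)]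
  omega

-- halving the accumulator: A's divisor-doubling sum peels off one ceil-half
lemma needTwoGo_shift : ∀ (a : Nat) (m x T : Int), 1 ≤ x →
    needTwoGo a m (2 * x) T = needTwoGo a (PySem.Int.floordiv (m + 1) 2) x T := by
  intro a
  induction a with
  | zero => intro m x T _; rfl
  | succ a ih =>
    intro m x T hx
    show needTwoGo a m (2 * x * 2) (T + PySem.Int.floordiv (m + (2 * x) - 1) (2 * x))
        = needTwoGo a (PySem.Int.floordiv (m + 1) 2) (x * 2)
            (T + PySem.Int.floordiv (PySem.Int.floordiv (m + 1) 2 + x - 1) x)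
    have harg : m + (2 * x) - 1 = m + 2 * x - 1 := by ring
    rw [harg, ceil_half_compose m x hx]
    have hxx : 2 * x * 2 = 2 * (x * 2) := by ring
    rw [hxx, ih m (x * 2) _ (by omega)]

-- accumulator linearity of needTwoGo
lemma needTwoGo_acc : ∀ (a : Nat) (m x T : Int), needTwoGo a m x T = T + needTwoGo a m x 0 := by
  intro a
  induction a with
  | zero => intro m x T; simp [needTwoGo]
  | succ a ih =>
    intro m x T
    show needTwoGo a m (x * 2) (T + PySem.Int.floordiv (m + x - 1) x)
        = T + needTwoGo a m (x * 2) (0 + PySem.Int.floordiv (m + x - 1) x)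
    rw [ih m (x * 2) (T + PySem.Int.floordiv (m + x - 1) x),
        ih m (x * 2) (0 + PySem.Int.floordiv (m + x - 1) x)]
    omega

lemma needTwoA_succ (a : Nat) (m : Int) :
    needTwoA (a + 1) m
      = PySem.Int.floordiv (m + 1) 2 + needTwoA a (PySem.Int.floordiv (m + 1) 2) := by
  show needTwoGo a m (2 * 2) (0 + PySem.Int.floordiv (m + 2 - 1) 2) = _
  have harg : m + 2 - 1 = m + 1 := by ring
  rw [harg, needTwoGo_shift a m 2 _ (by omega), needTwoGo_acc]
  unfold needTwoA
  omega

-- popcount facts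
lemma pc_double : ∀ (k : Nat), pc (2 * k) = pc k := by
  intro k
  cases k with
  | zero => rfl
  | succ k =>
    have h : 2 * (k + 1) = (2 * k + 1) + 1 := by omega
    rw [h, pc]
    have h1 : (2 * k + 1 + 1) / 2 = k + 1 := by omega
    have h2 : (2 * k + 1 + 1) % 2 = 0 := by omega
    rw [h1, h2]
    omega

lemma pc_double_succ (k : Nat) : pc (2 * k + 1) = pc k + 1 := by
  show pc ((2 * k) + 1) = pc k + 1
  rw [pc]
  have h1 : (2 * k + 1) / 2 = k := by omega
  have h2 : (2 * k + 1) % 2 = 1 := by omega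
  rw [h1, h2]

-- the closed form: need_two(a, m) = a + (m-1) - popcount(m-1) for 1 ≤ m ≤ 2^a
lemma needTwoA_closed : ∀ (a : Nat) (m : Int), 1 ≤ m → m ≤ 2 ^ a → needTwoA a m = costB a m := by
  intro a
  induction a with
  | zero =>
    intro m h1 h2
    have hm : m = 1 := by norm_num at h2; omega
    subst hm
    simp [needTwoA, needTwoGo, costB, pc]
  | succ a ih =>
    intro m h1 h2
    have hP : (1:Int) ≤ 2 ^ a := one_le_pow₀ (by norm_num)
    have hpow : (2:Int) ^ (a + 1) = 2 * 2 ^ a := by rw [pow_succ]; ring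
    rw [needTwoA_succ, PySem.Int.floordiv_eq_ediv_of_pos (by omega : (0:Int) < 2)]
    set t := (m + 1) / 2 with htdef
    have hm2 : 2 * t + (m + 1) % 2 = m + 1 := Int.mul_ediv_add_emod (m + 1) 2
    have hmod : 0 ≤ (m + 1) % 2 ∧ (m + 1) % 2 < 2 := ⟨Int.emod_nonneg _ (by omega), Int.emod_lt_of_pos _ (by omega)⟩
    have ht1 : 1 ≤ t := by omega
    have ht2 : t ≤ 2 ^ a := by rw [hpow] at h2; omega
    rw [ih t ht1 ht2]
    unfold costB
    set n : Nat := (m - 1).toNat with hndef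
    have hmn : m - 1 = (n : Int) := by omega
    have htn : t - 1 = ((n / 2 : Nat) : Int) := by
      have := Nat.div_add_mod n 2
      omega
    rw [hmn, htn]
    simp only [Int.toNat_natCast]
    rcases Nat.even_or_odd n with ⟨j, hj⟩ | ⟨j, hj⟩
    · have hj2 : n = 2 * j := by omega
      have hn2 : n / 2 = j := by omega
      have hpcn : pc n = pc j := by rw [hj2, pc_double]
      rw [hn2, hpcn]
      push_cast
      omega
    · have hj2 : n = 2 * j + 1 := by omega
      have hn2 : n / 2 = j := by omega
      have hpcn : pc n = pc j + 1 := by rw [hj2, pc_double_succ]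
      rw [hn2, hpcn]
      push_cast
      omega

-- monotonicity of need_two in m (and in the accumulator)
lemma needTwoGo_mono : ∀ (a : Nat) (m m' x T T' : Int), 1 ≤ x → m ≤ m' → T ≤ T' →
    needTwoGo a m x T ≤ needTwoGo a m' x T' := by
  intro a
  induction a with
  | zero => intro m m' x T T' _ _ hT; exact hT
  | succ a ih =>
    intro m m' x T T' hx hm hT
    refine ih m m' (x * 2) _ _ (by omega) hm ?_
    have h1 : PySem.Int.floordiv (m + x - 1) x ≤ PySem.Int.floordiv (m' + x - 1) x := by
      rw [PySem.Int.floordiv_eq_ediv_of_pos (by omega : (0:Int) < x),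
          PySem.Int.floordiv_eq_ediv_of_pos (by omega : (0:Int) < x)]
      exact Int.ediv_le_ediv (by omega) (by omega)
    omega

lemma f_mono (a : Nat) (cap3 m m' : Int) (hc : 0 ≤ cap3) (hm : m ≤ m') :
    needTwoA a m + m * cap3 ≤ needTwoA a m' + m' * cap3 := by
  have h1 : needTwoA a m ≤ needTwoA a m' := needTwoGo_mono a m m' 2 0 0 (by omega) hm le_rfl
  have h2 : m * cap3 ≤ m' * cap3 := mul_le_mul_of_nonneg_right hm hc
  omega

-- reference function for the proofs only: least m in [lo, hi] with D <= f m, else best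
def lsearchD (a : Nat) (cap3 D lo hi best : Int) : Int :=
  if _h : lo ≤ hi then
    if D ≤ needTwoA a lo + lo * cap3 then lo else lsearchD a cap3 D (lo + 1) hi best
  else best
termination_by (hi + 1 - lo).toNat
decreasing_by omega

-- skipping a failing prefix does not change the result
lemma lsearchD_skip (a : Nat) (cap3 D hi best mid : Int) (hmh : mid ≤ hi) :
    ∀ (n : Nat) (lo : Int), (mid + 1 - lo).toNat ≤ n → lo ≤ mid + 1 →
    (∀ j, lo ≤ j → j ≤ mid → ¬ (D ≤ needTwoA a j + j * cap3)) →
    lsearchD a cap3 D lo hi best = lsearchD a cap3 D (mid + 1) hi best := by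
  intro n
  induction n with
  | zero =>
    intro lo hn hlo _
    have : lo = mid + 1 := by omega
    rw [this]
  | succ n ih =>
    intro lo hn hlo hfail
    by_cases heq : lo = mid + 1
    · rw [heq]
    · have hlt : lo ≤ mid := by omega
      rw [lsearchD]
      rw [dif_pos (by omega : lo ≤ hi), if_neg (hfail lo le_rfl hlt)]
      exact ih (lo + 1) (by omega) (by omega) (fun j h1 h2 => hfail j (by omega) h2)

-- a known satisfier at mid: searching [lo, hi] is searching [lo, mid-1] with fallback mid
lemma lsearchD_cut (a : Nat) (cap3 D hi best mid : Int) (hmh : mid ≤ hi)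
    (hP : D ≤ needTwoA a mid + mid * cap3) :
    ∀ (n : Nat) (lo : Int), (mid - lo).toNat ≤ n → lo ≤ mid →
    lsearchD a cap3 D lo hi best = lsearchD a cap3 D lo (mid - 1) mid := by
  intro n
  induction n with
  | zero =>
    intro lo hn hlo
    have heq : lo = mid := by omega
    rw [heq, lsearchD, dif_pos (by omega : mid ≤ hi), if_pos hP,
        lsearchD, dif_neg (by omega : ¬ mid ≤ mid - 1)]
  | succ n ih =>
    intro lo hn hlo
    by_cases heq : lo = mid
    · rw [heq, lsearchD, dif_pos (by omega : mid ≤ hi), if_pos hP,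
          lsearchD, dif_neg (by omega : ¬ mid ≤ mid - 1)]
    · rw [lsearchD, dif_pos (by omega : lo ≤ hi)]
      conv_rhs => rw [lsearchD]
      rw [dif_pos (by omega : lo ≤ mid - 1)]
      by_cases hPlo : D ≤ needTwoA a lo + lo * cap3
      · rw [if_pos hPlo, if_pos hPlo]
      · rw [if_neg hPlo, if_neg hPlo]
        exact ih (lo + 1) (by omega) (by omega)

-- under a monotone predicate, A's binary search IS the least-satisfier search
lemma bsearch_eq_lsearchD (a : Nat) (cap3 D : Int) (hc : 0 ≤ cap3) :
    ∀ (n : Nat) (lo hi best : Int), (hi + 1 - lo).toNat ≤ n →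
    bsearch a cap3 D n lo hi best = lsearchD a cap3 D lo hi best := by
  intro n
  induction n with
  | zero =>
    intro lo hi best hn
    rw [bsearch, lsearchD, dif_neg (by omega : ¬ lo ≤ hi)]
  | succ n ih =>
    intro lo hi best hn
    by_cases hlh : lo ≤ hi
    · have hmid := PySem.Int.floordiv_two_mid_bounds hlh
      set mid := PySem.Int.floordiv (lo + hi) 2 with hm
      rw [bsearch, if_pos hlh]
      simp only [← hm, ge_iff_le]
      by_cases hP : D ≤ needTwoA a mid + mid * cap3
      · rw [if_pos hP, ih lo (mid - 1) mid (by omega)]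
        rw [lsearchD_cut a cap3 D hi best mid (by omega) hP (mid - lo).toNat lo le_rfl (by omega)]
      · rw [if_neg hP, ih (mid + 1) hi best (by omega)]
        exact (lsearchD_skip a cap3 D hi best mid (by omega) (mid + 1 - lo).toNat lo le_rfl
          (by omega) (fun j h1 h2 hPj => hP (le_trans hPj (f_mono a cap3 j mid hc h2)))).symm
    · rw [bsearch, if_neg hlh, lsearchD, dif_neg hlh]

-- B's forward walk from m equals the least-satisfier search from m (on [1, 2^a])
lemma scanUp_eq_lsearchD (a : Nat) (c D : Int) :
    ∀ (n : Nat) (m : Int), ((2:Int) ^ a - m).toNat = n → 1 ≤ m → m ≤ 2 ^ a →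
    scanUp a c D n m = lsearchD a c D m ((2:Int) ^ a) ((2:Int) ^ a) := by
  intro n
  induction n with
  | zero =>
    intro m hn h1 h2
    have hm : m = 2 ^ a := by omega
    rw [scanUp, lsearchD, dif_pos (by omega : m ≤ 2 ^ a)]
    by_cases hP : D ≤ needTwoA a m + m * c
    · rw [if_pos hP]
    · rw [if_neg hP, lsearchD, dif_neg (by omega : ¬ m + 1 ≤ 2 ^ a), hm]
  | succ n ih =>
    intro m hn h1 h2
    have hlt : m < 2 ^ a := by omega
    have hcb : needTwoA a m = costB a m := needTwoA_closed a m h1 h2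
    by_cases hP : costB a m + m * c < D
    · have hP' : ¬ D ≤ needTwoA a m + m * c := by rw [hcb]; omega
      rw [scanUp, if_pos hP,
          lsearchD, dif_pos (by omega : m ≤ 2 ^ a), if_neg hP']
      exact ih (m + 1) (by omega) (by omega) (by omega)
    · have hP' : D ≤ needTwoA a m + m * c := by rw [hcb]; omega
      rw [scanUp, if_neg hP,
          lsearchD, dif_pos (by omega : m ≤ 2 ^ a), if_pos hP']

-- every m with m*(c+1) ≤ D - a fails the predicate (popcount ≥ 0)
lemma fails_below (a : Nat) (c D j : Int) (h1 : 1 ≤ j) (hj : j ≤ 2 ^ a)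
    (hineq : j * (c + 1) ≤ D - (a : Int)) : ¬ (D ≤ needTwoA a j + j * c) := by
  rw [needTwoA_closed a j h1 hj]
  unfold costB
  have hpc : (0:Int) ≤ (pc (j - 1).toNat : Int) := Int.natCast_nonneg _
  have hx : j * (c + 1) = j * c + j := by ring
  omega

-- B's firstReach IS the least-satisfier search on [1, 2^a]
lemma firstReach_eq (a : Nat) (c D : Int) (hc : 0 ≤ c) :
    firstReach a c D ((2:Int) ^ a) = lsearchD a c D 1 ((2:Int) ^ a) ((2:Int) ^ a) := by
  have hP1 : (1:Int) ≤ 2 ^ a := one_le_pow₀ (by norm_num)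
  unfold firstReach
  set q := PySem.Int.floordiv (D - (a : Int)) (c + 1) with hq
  have hqe : q = (D - (a : Int)) / (c + 1) := by
    rw [hq, PySem.Int.floordiv_eq_ediv_of_pos (by omega : (0:Int) < c + 1)]
  set s := min ((2:Int) ^ a) (max 1 (q + 1)) with hs
  have hs1 : 1 ≤ s := by omega
  have hs2 : s ≤ 2 ^ a := by omega
  rw [scanUp_eq_lsearchD a c D ((2:Int) ^ a - s).toNat s rfl hs1 hs2]
  have hfail : ∀ j, 1 ≤ j → j ≤ s - 1 → ¬ (D ≤ needTwoA a j + j * c) := by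
    intro j hj1 hj2
    have hjq : j ≤ q := by omega
    have hmul : j * (c + 1) ≤ q * (c + 1) := mul_le_mul_of_nonneg_right hjq (by omega)
    have hqm : q * (c + 1) ≤ D - (a : Int) := by
      rw [hqe]; exact Int.ediv_mul_le _ (by omega)
    exact fails_below a c D j hj1 (by omega) (by omega)
  have := lsearchD_skip a c D ((2:Int) ^ a) ((2:Int) ^ a) (s - 1) (by omega)
    (s - 1 + 1 - 1).toNat 1 le_rfl (by omega) (fun j ha hb => hfail j ha hb)
  rw [this]
  congr 1
  omega

-- the result of the least-satisfier search stays in [1, N]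
lemma lsearchD_bounds (a : Nat) (c D N : Int) (hN : 1 ≤ N) :
    ∀ (n : Nat) (lo : Int), (N + 1 - lo).toNat ≤ n → 1 ≤ lo →
    1 ≤ lsearchD a c D lo N N ∧ lsearchD a c D lo N N ≤ N := by
  intro n
  induction n with
  | zero =>
    intro lo hn h1
    rw [lsearchD, dif_neg (by omega : ¬ lo ≤ N)]
    omega
  | succ n ih =>
    intro lo hn h1
    by_cases hlh : lo ≤ N
    · rw [lsearchD, dif_pos hlh]
      by_cases hP : D ≤ needTwoA a lo + lo * c
      · rw [if_pos hP]; omega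
      · rw [if_neg hP]; exact ih (lo + 1) (by omega) (by omega)
    · rw [lsearchD, dif_neg hlh]; omega

-- the two inner searches and their prefix costs agree
lemma inner_eq (a : Nat) (c D : Int) (hc : 0 ≤ c) :
    needTwoA a (bsearch a c D ((2:Int) ^ a).toNat 1 ((2:Int) ^ a) ((2:Int) ^ a))
      = costB a (firstReach a c D ((2:Int) ^ a)) := by
  have hP1 : (1:Int) ≤ 2 ^ a := one_le_pow₀ (by norm_num)
  rw [firstReach_eq a c D hc,
      bsearch_eq_lsearchD a c D hc ((2:Int) ^ a).toNat 1 (2 ^ a) (2 ^ a) (by omega)]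
  have hb := lsearchD_bounds a c D ((2:Int) ^ a) hP1 (((2:Int) ^ a) + 1 - 1).toNat 1 le_rfl le_rfl
  exact needTwoA_closed a _ hb.1 hb.2

-- stop lemmas: once the guard fails, any fuel gives the same value
lemma buildPow3_stop (S p3 : Int) (h : ¬ p3 ≤ S) : ∀ (m : Nat), buildPow3 S m p3 = [p3] := by
  intro m
  cases m with
  | zero => rfl
  | succ m => rw [buildPow3, if_neg h]

lemma buildPow2_stop (S p2 : Int) (h : ¬ p2 ≤ S) : ∀ (m : Nat), buildPow2 S m p2 = [p2] := by
  intro m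
  cases m with
  | zero => rfl
  | succ m => rw [buildPow2, if_neg h]

lemma altLoopB_stop (D S p2 : Int) (a : Nat) (cap p3 ans : Int) (h : ¬ p2 * p3 ≤ S) :
    ∀ (k : Nat), altLoopB D S p2 a k cap p3 ans = ans := by
  intro k
  cases k with
  | zero => rfl
  | succ k => rw [altLoopB, if_neg h]

lemma altLoopA_stop (D S p2 : Int) (a : Nat) (ans : Int) (h : ¬ p2 ≤ S) :
    ∀ (k : Nat), altLoopA D S k p2 a ans = ans := by
  intro k
  cases k with
  | zero => rfl
  | succ k => rw [altLoopA, if_neg h]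

-- the two inner loops agree (A walks the rest of the pow3 list, B multiplies on the fly,
-- keeping cap = (p3 - 1) / 2 incrementally)
lemma loopB_eq (D S p2 : Int) (a : Nat) (hp2 : 1 ≤ p2) (hpow : p2 = 2 ^ a) :
    ∀ (n : Nat) (p3 cap : Int) (m k : Nat),
    (S + 1 - p3).toNat ≤ n → (S + 1 - p3).toNat ≤ m → (S + 1 - p3).toNat ≤ k →
    1 ≤ p3 → p3 = 2 * cap + 1 → 0 ≤ cap →
    ∀ (ans : Int),
    loopB D S p2 a (buildPow3 S m p3) ans = altLoopB D S p2 a k cap p3 ans := by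
  intro n
  induction n with
  | zero =>
    intro p3 cap m k hn hm hk hp3 hcap hc0 ans
    have hgtS : S < p3 := by omega
    have hbig : ¬ p2 * p3 ≤ S := by
      have : 1 * p3 ≤ p2 * p3 := mul_le_mul_of_nonneg_right hp2 (by omega)
      omega
    rw [buildPow3_stop S p3 (by omega) m, altLoopB_stop D S p2 a cap p3 ans hbig k]
    rw [loopB, if_pos (by omega : p2 * p3 > S)]
  | succ n ih =>
    intro p3 cap m k hn hm hk hp3 hcap hc0 ans
    by_cases hbig : p2 * p3 ≤ S
    · have hle : p3 ≤ S := by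
        have : 1 * p3 ≤ p2 * p3 := mul_le_mul_of_nonneg_right hp2 (by omega)
        omega
      have hmeas : 1 ≤ (S + 1 - p3).toNat := by omega
      obtain ⟨m', rfl⟩ : ∃ m', m = m' + 1 := ⟨m - 1, by omega⟩
      obtain ⟨k', rfl⟩ : ∃ k', k = k' + 1 := ⟨k - 1, by omega⟩
      rw [buildPow3, if_pos hle, loopB, if_neg (by omega : ¬ p2 * p3 > S),
          altLoopB, if_pos hbig]
      have hfd : PySem.Int.floordiv (p3 - 1) 2 = cap := by
        rw [PySem.Int.floordiv_eq_ediv_of_pos (by omega : (0:Int) < 2)]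
        omega
      simp only [hfd]
      have hinner :
          needTwoA a (bsearch a cap D p2.toNat 1 p2 p2) = costB a (firstReach a cap D p2) := by
        rw [hpow]
        exact inner_eq a cap D hc0
      rw [hinner]
      have h3 : p3 * 3 = 3 * p3 := by ring
      rw [h3]
      exact ih (3 * p3) (3 * cap + 1) m' k' (by omega) (by omega) (by omega)
        (by omega) (by omega) (by omega) _
    · rw [altLoopB_stop D S p2 a cap p3 ans hbig k]
      by_cases hle : p3 ≤ S
      · obtain ⟨m', rfl⟩ : ∃ m', m = m' + 1 := ⟨m - 1, by omega⟩
        rw [buildPow3, if_pos hle, loopB, if_pos (by omega : p2 * p3 > S)]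
      · rw [buildPow3_stop S p3 hle m, loopB, if_pos (by omega : p2 * p3 > S)]

-- entering the inner loop: A drops the head of the pow3 list, B starts at (cap, p3) = (1, 3)
lemma loopB_start (D S p2 : Int) (a : Nat) (hp2 : 1 ≤ p2) (hpow : p2 = 2 ^ a) (ans : Int) :
    loopB D S p2 a ((buildPow3 S (S + 1).toNat 1).drop 1) ans
      = altLoopB D S p2 a (S + 1).toNat 1 3 ans := by
  by_cases h1 : (1:Int) ≤ S
  · obtain ⟨F', hF⟩ : ∃ F', (S + 1).toNat = F' + 1 := ⟨(S + 1).toNat - 1, by omega⟩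
    rw [hF, buildPow3, if_pos h1]
    have hdrop : ((1:Int) :: buildPow3 S F' (1 * 3)).drop 1 = buildPow3 S F' 3 := by norm_num
    rw [hdrop]
    exact loopB_eq D S p2 a hp2 hpow (S + 1 - 3).toNat 3 1 F' (F' + 1) le_rfl
      (by omega) (by omega) (by omega) (by omega) (by omega) ans
  · have hbig : ¬ p2 * 3 ≤ S := by
      have : 1 * 3 ≤ p2 * 3 := mul_le_mul_of_nonneg_right hp2 (by omega)
      omega
    rw [buildPow3_stop S 1 (by omega) _, altLoopB_stop D S p2 a 1 3 ans hbig]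
    rfl

-- the two outer loops agree
lemma loopA_eq (D S : Int) :
    ∀ (n : Nat) (p2 : Int) (a : Nat) (m k : Nat),
    (S + 1 - p2).toNat ≤ n → (S + 1 - p2).toNat ≤ m → (S + 1 - p2).toNat ≤ k →
    1 ≤ p2 → p2 = 2 ^ a →
    ∀ (ans : Int),
    loopA D S (buildPow3 S (S + 1).toNat 1) (buildPow2 S m p2) a ans
      = altLoopA D S k p2 a ans := by
  intro n
  induction n with
  | zero =>
    intro p2 a m k hn hm hk hp2 hpow ans
    rw [buildPow2_stop S p2 (by omega) m, altLoopA_stop D S p2 a ans (by omega) k]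
    rw [loopA, if_pos (by omega : p2 > S)]
  | succ n ih =>
    intro p2 a m k hn hm hk hp2 hpow ans
    by_cases hle : p2 ≤ S
    · have hmeas : 1 ≤ (S + 1 - p2).toNat := by omega
      obtain ⟨m', rfl⟩ : ∃ m', m = m' + 1 := ⟨m - 1, by omega⟩
      obtain ⟨k', rfl⟩ : ∃ k', k = k' + 1 := ⟨k - 1, by omega⟩
      rw [buildPow2, if_pos hle, loopA, if_neg (by omega : ¬ p2 > S),
          altLoopA, if_pos hle]
      show loopA D S (buildPow3 S (S + 1).toNat 1) (buildPow2 S m' (p2 * 2)) (a + 1)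
            (loopB D S p2 a ((buildPow3 S (S + 1).toNat 1).drop 1) (max ans (1 + min D (p2 - 1))))
          = altLoopA D S k' (2 * p2) (a + 1)
            (altLoopB D S p2 a (S + 1).toNat 1 3 (max ans (1 + min D (p2 - 1))))
      rw [loopB_start D S p2 a hp2 hpow, (by ring : p2 * 2 = 2 * p2)]
      exact ih (2 * p2) (a + 1) m' k' (by omega) (by omega) (by omega) (by omega)
        (by rw [hpow, pow_succ]; ring) _
    · rw [buildPow2_stop S p2 hle m, altLoopA_stop D S p2 a ans hle k]
      rw [loopA, if_pos (by omega : p2 > S)]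

theorem solution_eq_alt (D S : Int) : solution D S = solution_alt D S := by
  unfold solution solution_alt
  exact loopA_eq D S (S + 1).toNat 1 0 (S + 1).toNat ((S + 1).toNat) (by omega) (by omega)
    (by omega) (by omega) (by norm_num) 1

-- ===== VERDICT (by name: the statement is the Claim_ definition above) =====
theorem solution_spec : Claim_equal_solution := by
  intro d s _
  unfold Spec_solution
  exact solution_eq_alt d s
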